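-- pv_equiv track=rewrite | github.com/warrensLee/whippet_dog_platform | backend/classes/stats.py | apply_competition_ranking
-- ===== SOURCE A (Python) =====
-- def apply_competition_ranking(rows, value_key="value"):
--     prev_value = None
--     prev_rank = 0
--
--     for idx, row in enumerate(rows, 1):
--         current_value = row.get(value_key, 0) or 0
--
--         if prev_value is not None and current_value == prev_value:
--             row['rank'] = prev_rank
--         else:
--             row['rank'] = idx
--             prev_rank = idx
--
--         prev_value = current_value
--
--     return rows
-- ===== SOURCE B (Python) =====
-- def apply_competition_ranking(rows, value_key="value"):
--     def key(r):
--         return r.get(value_key, 0) or 0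
--
--     i = 0
--     n = len(rows)
--     while i < n:
--         k = key(rows[i])
--         j = i + 1
--         while j < n and key(rows[j]) == k:
--             j += 1
--         rank = i + 1
--         for t in range(i, j):
--             rows[t]['rank'] = rank
--         i = j
--     return rows
-- ===== Notes on version B (the rewrite author's own statement) =====
-- stated objective: alternative
-- what changed: Replaces A's prev_value/prev_rank state machine with a two-pointer run-grouping pass: find each maximal run of rows with equal key, assign its start index + 1 as the rank to the whole run at once.
import Mathlib
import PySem

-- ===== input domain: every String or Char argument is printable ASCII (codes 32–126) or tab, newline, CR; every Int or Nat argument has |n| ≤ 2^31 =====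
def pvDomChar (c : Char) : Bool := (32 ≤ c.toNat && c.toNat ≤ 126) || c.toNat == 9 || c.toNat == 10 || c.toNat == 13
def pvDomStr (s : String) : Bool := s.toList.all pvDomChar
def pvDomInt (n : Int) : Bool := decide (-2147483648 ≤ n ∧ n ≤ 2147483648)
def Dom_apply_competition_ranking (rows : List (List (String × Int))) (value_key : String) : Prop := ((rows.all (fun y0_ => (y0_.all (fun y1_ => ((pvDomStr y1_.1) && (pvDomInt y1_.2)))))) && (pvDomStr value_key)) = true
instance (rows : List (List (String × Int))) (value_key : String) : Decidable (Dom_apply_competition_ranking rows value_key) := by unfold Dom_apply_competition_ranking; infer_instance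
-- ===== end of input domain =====

-- B rewrites A's prev_value/prev_rank state machine as a run-grouping pass (find each maximal
-- run of equal keys, rank the whole run at once); same cost, alternative decomposition.
-- Note: the Python A mutates the row dicts in place; the equivalence here is about the return value.

-- row.get(value_key, 0)  (shared Python-builtin shim over the assoc-list encoding of a dict)
def pvRowGetD (row : List (String × Int)) (k : String) (dflt : Int) : Int :=
  (PySem.Dict.mk row).getD k dflt

-- row[k] = v  (Python dict assignment on the assoc-list encoding)
def pvRowSet (row : List (String × Int)) (k : String) (v : Int) : List (String × Int) :=
  ((PySem.Dict.mk row).insert k v).items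

-- ===== PORT A =====
-- the for-loop over enumerate(rows, 1) with state (prev_value, prev_rank)
def pvLoopA (value_key : String) : List (List (String × Int)) → Int → Option Int → Int → List (List (String × Int))
  | [], _, _, _ => []
  | row :: rest, idx, prevV, prevR =>
    let g := pvRowGetD row value_key 0
    let current : Int := if g = 0 then 0 else g   -- row.get(value_key, 0) or 0
    match prevV with
    | some v =>
      if current = v then
        pvRowSet row "rank" prevR :: pvLoopA value_key rest (idx + 1) (some current) prevR
      else
        pvRowSet row "rank" idx :: pvLoopA value_key rest (idx + 1) (some current) idx
    | none =>
        pvRowSet row "rank" idx :: pvLoopA value_key rest (idx + 1) (some current) idx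

def apply_competition_ranking (rows : List (List (String × Int))) (value_key : String) : List (List (String × Int)) :=
  pvLoopA value_key rows 1 none 0

-- ===== PORT B =====
-- key(r) = r.get(value_key, 0) or 0
def pvKeyB (value_key : String) (row : List (String × Int)) : Int :=
  let g := pvRowGetD row value_key 0
  if g = 0 then 0 else g

-- the outer while-loop over runs: the inner `while key(rows[j]) == k` is the takeWhile,
-- `i = j` is the dropWhile, `rank = i + 1` is position + 1
def pvLoopB (value_key : String) : List (List (String × Int)) → Int → List (List (String × Int))
  | [], _ => []
  | row :: rest, position =>
    let k := pvKeyB value_key row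
    let run := rest.takeWhile (fun r => pvKeyB value_key r == k)
    let rank := position + 1
    (pvRowSet row "rank" rank :: run.map (fun r => pvRowSet r "rank" rank))
      ++ pvLoopB value_key (rest.dropWhile (fun r => pvKeyB value_key r == k)) (position + 1 + run.length)
termination_by rows _ => rows.length
decreasing_by
  exact Nat.lt_succ_of_le (List.length_dropWhile_le _ _)

def apply_competition_ranking_alt (rows : List (List (String × Int))) (value_key : String) : List (List (String × Int)) :=
  pvLoopB value_key rows 0

-- ===== PRECONDITION & SPEC =====
def Spec_apply_competition_ranking (rows : List (List (String × Int))) (value_key : String) (out : List (List (String × Int))) : Prop := out = apply_competition_ranking_alt rows value_key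
instance (rows : List (List (String × Int))) (value_key : String) (out : List (List (String × Int))) : Decidable (Spec_apply_competition_ranking rows value_key out) := by unfold Spec_apply_competition_ranking; infer_instance

-- ===== CLAIM (what is proved, stated in full; the proofs are below) =====
def Claim_equal_apply_competition_ranking : Prop := ∀ (rows : List (List (String × Int))) (value_key : String), Dom_apply_competition_ranking rows value_key → Spec_apply_competition_ranking rows value_key (apply_competition_ranking rows value_key)

-- ===== LEMMAS AND PROOFS =====

-- While prev_value = some v, A assigns prev_rank r throughout the maximal run of key v,
-- then restarts as if prev_value were none at the first differing row.
theorem pvLoopA_some (value_key : String) (rest : List (List (String × Int))) :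
    ∀ (idx r v : Int),
      pvLoopA value_key rest idx (some v) r =
        (rest.takeWhile (fun x => pvKeyB value_key x == v)).map (fun x => pvRowSet x "rank" r)
          ++ pvLoopA value_key (rest.dropWhile (fun x => pvKeyB value_key x == v))
              (idx + (rest.takeWhile (fun x => pvKeyB value_key x == v)).length) none 0 := by
  induction rest with
  | nil => intro idx r v; simp [pvLoopA]
  | cons x xs ih =>
    intro idx r v
    by_cases h : pvKeyB value_key x = v
    · have hb : (pvKeyB value_key x == v) = true := by simpa using h
      simp only [pvLoopA, List.takeWhile_cons, List.dropWhile_cons, hb]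
      have hcur : (if pvRowGetD x value_key 0 = 0 then (0:Int) else pvRowGetD x value_key 0) = v := by
        simpa [pvKeyB] using h
      rw [hcur]
      rw [ih (idx + 1) r v]
      have : idx + 1 + ((xs.takeWhile (fun x => pvKeyB value_key x == v)).length : Int)
           = idx + (((xs.takeWhile (fun x => pvKeyB value_key x == v)).length : Int) + 1) := by ring
      simp [this]
    · have hb : (pvKeyB value_key x == v) = false := by simpa using h
      have hcur : ¬ (if pvRowGetD x value_key 0 = 0 then (0:Int) else pvRowGetD x value_key 0) = v := by
        simpa [pvKeyB] using h
      simp [pvLoopA, hb, hcur]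

-- Main correspondence: A's fresh-state loop at index position+1 is B's run loop at position.
theorem pvLoop_main (value_key : String) :
    ∀ (n : ℕ) (rows : List (List (String × Int))) (position : Int), rows.length = n →
      pvLoopA value_key rows (position + 1) none 0 = pvLoopB value_key rows position := by
  intro n
  induction n using Nat.strong_induction_on with
  | _ n ih =>
    intro rows position hlen
    cases rows with
    | nil => simp [pvLoopA, pvLoopB]
    | cons row rest =>
      rw [pvLoopB]
      simp only [pvLoopA]
      have hk : (if pvRowGetD row value_key 0 = 0 then (0:Int) else pvRowGetD row value_key 0)
              = pvKeyB value_key row := by simp [pvKeyB]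
      rw [hk]
      rw [pvLoopA_some value_key rest (position + 1 + 1) (position + 1) (pvKeyB value_key row)]
      have hlt : (rest.dropWhile (fun r => pvKeyB value_key r == pvKeyB value_key row)).length < n := by
        have := List.length_dropWhile_le (fun r => pvKeyB value_key r == pvKeyB value_key row) rest
        simp only [List.length_cons] at hlen
        omega
      have harith : position + 1 + 1 + ((rest.takeWhile (fun r => pvKeyB value_key r == pvKeyB value_key row)).length : Int)
                  = position + 1 + ((rest.takeWhile (fun r => pvKeyB value_key r == pvKeyB value_key row)).length : Int) + 1 := by ring
      rw [harith, ih _ hlt _ (position + 1 + ((rest.takeWhile (fun r => pvKeyB value_key r == pvKeyB value_key row)).length : Int)) rfl]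
      simp

-- ===== VERDICT (by name: the statement is the Claim_ definition above) =====
theorem apply_competition_ranking_spec : Claim_equal_apply_competition_ranking := by
  intro rows value_key _
  unfold Spec_apply_competition_ranking apply_competition_ranking apply_competition_ranking_alt
  have := pvLoop_main value_key rows.length rows 0 rfl
  simpa using this
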